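-- pv_equiv track=rewrite | github.com/oelki9/nagel-schreckenberg | main.py | slow_down
-- ===== SOURCE A (Python) =====
-- MT_CELL = -1  # empty cell
--
-- def slow_down(cells):
--     """slow down if cars are in front"""
--     for n in range(len(cells)):
--         if cells[n] != MT_CELL:
--             for c in range(1, cells[n] + 1):  # actual speed is stored in cells[n]
--                 if cells[(n + c) % len(cells)] != MT_CELL:
--                     cells[n] = c - 1
--                     break
--     return cells
-- ===== SOURCE B (Python) =====
-- MT_CELL = -1  # empty cell
--
-- def slow_down(cells):
--     """slow down if cars are in front (one backward pass over the doubled ring)"""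
--     n = len(cells)
--     dist = [0] * n  # dist[j] = distance to next occupied cell ahead of j (ring)
--     cnt = 2 * n + 1
--     for i in range(2 * n - 1, -1, -1):
--         if i < n:
--             dist[i] = cnt
--         cnt = 1 if cells[i % n] != MT_CELL else cnt + 1
--     for j in range(n):
--         if cells[j] != MT_CELL:
--             cells[j] = min(cells[j], dist[j] - 1)
--     return cells
-- ===== Notes on version B (the rewrite author's own statement) =====
-- stated objective: alternative
-- what changed: Replaces A's per-car forward gap scan on the ring by a single backward pass over the doubled ring that precomputes every cell's distance to the next occupied cell, then sets each speed to min(v, dist-1); A's inner scan disappears.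
import Mathlib
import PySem

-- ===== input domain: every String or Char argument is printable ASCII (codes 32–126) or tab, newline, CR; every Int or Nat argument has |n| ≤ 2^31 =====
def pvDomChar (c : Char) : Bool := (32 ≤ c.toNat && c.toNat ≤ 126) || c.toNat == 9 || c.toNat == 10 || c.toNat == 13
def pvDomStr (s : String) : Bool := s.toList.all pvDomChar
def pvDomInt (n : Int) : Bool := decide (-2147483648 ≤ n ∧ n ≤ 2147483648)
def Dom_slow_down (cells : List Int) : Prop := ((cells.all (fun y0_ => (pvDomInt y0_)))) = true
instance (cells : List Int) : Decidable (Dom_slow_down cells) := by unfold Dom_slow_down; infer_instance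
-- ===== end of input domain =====

-- B replaces A's per-car forward scan on the ring by one backward pass over the doubled
-- ring that precomputes each cell's distance to the next occupied cell (alternative
-- algorithm, not measured faster); the equivalence is about the returned list — A mutates
-- its Python argument in place and B performs the same in-place updates (same final content).

-- ===== PORT A =====
-- inner loop 'for c in range(1, cells[n]+1): if cells[(n+c) % len(cells)] != MT_CELL: cells[n] = c-1; break'
-- recursion over the range list models the break; the index (n+c) % len is always in range
-- (c ≥ 1, len > 0 whenever the loop body runs), so `getD _ 0` reads exactly what Python reads
def slowDownScan (cs : List Int) (n : Nat) (c stop : Int) : List Int :=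
  if h : c < stop then
    if cs.getD (PySem.Int.mod ((n : Int) + c) (cs.length : Int)).toNat 0 ≠ -1 then
      cs.set n (c - 1)
    else slowDownScan cs n (c + 1) stop
  else cs
termination_by (stop - c).toNat
decreasing_by omega

def slow_down (cells : List Int) : List Int :=
  (List.range cells.length).foldl
    (fun cs n =>
      if cs.getD n 0 ≠ -1 then
        slowDownScan cs n 1 (cs.getD n 0 + 1)
      else cs)
    cells

-- ===== PORT B =====
-- Source B: one backward pass i = 2n-1 .. 0 over the doubled ring building dist[], then one
-- pass writing min(v, dist[j]-1); all indices (i % n, i < n, j) are in range, getD/set exact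
def slow_down_alt (cells : List Int) : List Int :=
  let n := cells.length
  let st := ((List.range (2 * n)).reverse).foldl
    (fun (st : List Int × Int) (i : Nat) =>
      (if i < n then st.1.set i st.2 else st.1,
       if cells.getD (i % n) 0 ≠ -1 then 1 else st.2 + 1))
    (List.replicate n 0, 2 * (n : Int) + 1)
  (List.range n).foldl
    (fun cs j =>
      if cs.getD j 0 ≠ -1 then cs.set j (min (cs.getD j 0) (st.1.getD j 0 - 1)) else cs)
    cells

-- ===== PRECONDITION & SPEC =====
def Spec_slow_down (cells : List Int) (out : List Int) : Prop := out = slow_down_alt cells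
instance (cells : List Int) (out : List Int) : Decidable (Spec_slow_down cells out) := by unfold Spec_slow_down; infer_instance

-- ===== CLAIM (what is proved, stated in full; the proofs are below) =====
def Claim_equal_slow_down : Prop := ∀ (cells : List Int), Dom_slow_down cells → Spec_slow_down cells (slow_down cells)

-- ===== LEMMAS AND PROOFS =====

-- occupancy of linear cell m on the doubled ring
def occB (cells : List Int) (m : Nat) : Bool := cells.getD (m % cells.length) 0 != -1

-- cnt value of B's backward pass after processing linear indices i .. 2n-1
def cfun (cells : List Int) (i : Nat) : Int :=
  if _h : i < 2 * cells.length then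
    (if occB cells i then 1 else cfun cells (i + 1) + 1)
  else 2 * (cells.length : Int) + 1
termination_by 2 * cells.length - i

-- the test A's inner scan performs at offset c from position n
def scanPred (cs : List Int) (n : Nat) (c : Int) : Bool :=
  cs.getD (PySem.Int.mod ((n : Int) + c) (cs.length : Int)).toNat 0 != -1

-- value A leaves at position j (computed against the ORIGINAL cells)
def targetA (cells : List Int) (j : Nat) : Int :=
  if cells.getD j 0 = -1 then cells.getD j 0
  else
    match (PySem.List.pyRange 1 (cells.getD j 0 + 1) 1).find? (scanPred cells j) with
    | some c => c - 1
    | none => cells.getD j 0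

-- value B leaves at position j
def targetB (cells : List Int) (j : Nat) : Int :=
  if cells.getD j 0 = -1 then cells.getD j 0
  else min (cells.getD j 0) (cfun cells (j + 1) - 1)

lemma map_range_set {α : Type} (f : Nat → α) (N k : Nat) (x : α) (hk : k < N) :
    ((List.range N).map f).set k x = (List.range N).map (fun j => if j = k then x else f j) := by
  apply List.ext_getElem
  · simp
  · intro i h1 h2
    simp only [List.length_set, List.length_map, List.length_range] at h1
    rw [List.getElem_set]
    simp only [List.getElem_map, List.getElem_range]
    by_cases hik : i = k
    · simp [hik]
    · rw [if_neg (fun h => hik h.symm), if_neg hik]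

lemma cells_self (cells : List Int) :
    (List.range cells.length).map (fun j => cells.getD j 0) = cells := by
  apply List.ext_getElem
  · simp
  · intro i h1 h2
    simp only [List.getElem_map, List.getElem_range]
    rw [List.getD_eq_getElem?_getD, List.getElem?_eq_getElem h2]
    rfl

lemma scan_eq_find (cs : List Int) (n : Nat) (c stop : Int) :
    slowDownScan cs n c stop =
      match (PySem.List.pyRange c stop 1).find? (scanPred cs n) with
      | some c => cs.set n (c - 1)
      | none => cs := by
  rw [slowDownScan]
  by_cases h : c < stop
  · rw [dif_pos h, PySem.List.pyRange_one_cons h, List.find?_cons]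
    by_cases hp : cs.getD (PySem.Int.mod ((n : Int) + c) (cs.length : Int)).toNat 0 = -1
    · rw [if_neg (not_not_intro hp),
        show scanPred cs n c = false from by rw [scanPred, bne_eq_false_iff_eq]; exact hp]
      exact scan_eq_find cs n (c + 1) stop
    · rw [if_pos hp,
        show scanPred cs n c = true from by rw [scanPred, bne_iff_ne]; exact hp]
  · rw [dif_neg h, PySem.List.pyRange_one_eq_nil (by omega), List.find?_nil]
termination_by (stop - c).toNat
decreasing_by omega

lemma targetA_neg1_iff (cells : List Int) (j : Nat) :
    targetA cells j = -1 ↔ cells.getD j 0 = -1 := by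
  rw [targetA]
  by_cases h : cells.getD j 0 = -1
  · rw [if_pos h]
  · rw [if_neg h]
    cases hf : (PySem.List.pyRange 1 (cells.getD j 0 + 1) 1).find? (scanPred cells j) with
    | none => exact Iff.rfl
    | some c =>
      show c - 1 = -1 ↔ cells.getD j 0 = -1
      have hc : c ∈ PySem.List.pyRange 1 (cells.getD j 0 + 1) 1 := List.mem_of_find?_eq_some hf
      have h1 : 1 ≤ c := (PySem.List.mem_pyRange_one.mp hc).1
      constructor
      · intro hcon; exfalso; omega
      · intro hcon; exact absurd hcon h

-- the scan's test only looks at occupancy, so it is invariant under A's in-place updates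
lemma scanPred_congr (cs cells : List Int) (n : Nat)
    (hlen : cs.length = cells.length) (hpos : 0 < cells.length)
    (hocc : ∀ idx, idx < cells.length → (cs.getD idx 0 = -1 ↔ cells.getD idx 0 = -1)) :
    scanPred cs n = scanPred cells n := by
  funext c
  rw [scanPred, scanPred, hlen]
  set idx := (PySem.Int.mod ((n : Int) + c) (cells.length : Int)).toNat with hidx
  have hlt : idx < cells.length := by
    have h1 := PySem.Int.mod_nonneg ((n : Int) + c) (b := (cells.length : Int)) (by exact_mod_cast hpos)
    have h2 := PySem.Int.mod_lt ((n : Int) + c) (b := (cells.length : Int)) (by exact_mod_cast hpos)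
    omega
  have hiff := hocc idx hlt
  by_cases h : cs.getD idx 0 = -1
  · rw [h, hiff.mp h]
  · rw [bne_iff_ne.mpr h, bne_iff_ne.mpr (fun e => h (hiff.mpr e))]

lemma A_fold (cells : List Int) :
    slow_down cells = (List.range cells.length).map (targetA cells) := by
  have key : ∀ k, k ≤ cells.length →
      (List.range k).foldl
        (fun cs n =>
          if cs.getD n 0 ≠ -1 then
            slowDownScan cs n 1 (cs.getD n 0 + 1)
          else cs)
        cells =
      (List.range cells.length).map
        (fun j => if j < k then targetA cells j else cells.getD j 0) := by
    intro k
    induction k with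
    | zero => intro _; simp only [List.range_zero, List.foldl_nil, Nat.not_lt_zero, if_neg,
        Nat.lt_irrefl, if_false]; rw [cells_self]
    | succ k ih =>
      intro hk
      have hkN : k < cells.length := by omega
      rw [List.range_succ, List.foldl_append, ih (by omega), List.foldl_cons, List.foldl_nil]
      set g := fun j => if j < k then targetA cells j else cells.getD j 0 with hg
      have hgapp : ∀ j, g j = if j < k then targetA cells j else cells.getD j 0 := fun _ => rfl
      set Mk := (List.range cells.length).map g with hMk
      have hMlen : Mk.length = cells.length := by rw [hMk, List.length_map, List.length_range]
      have hMget : ∀ idx, idx < cells.length → Mk.getD idx 0 = g idx := by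
        intro idx h; rw [hMk, PySem.List.getD_map_range _ _ _ _ h]
      have hoccM : ∀ idx, idx < cells.length → (Mk.getD idx 0 = -1 ↔ cells.getD idx 0 = -1) := by
        intro idx h
        rw [hMget idx h, hgapp idx]
        by_cases hik : idx < k
        · rw [if_pos hik]; exact targetA_neg1_iff cells idx
        · rw [if_neg hik]
      have hMk0 : Mk.getD k 0 = cells.getD k 0 := by
        rw [hMget k hkN, hgapp k, if_neg (Nat.lt_irrefl k)]
      by_cases hocc : cells.getD k 0 = -1
      · -- empty cell: A leaves it and every other cell unchanged this step
        rw [hMk0, if_neg (not_not_intro hocc), hMk]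
        apply List.map_congr_left
        intro j hj
        by_cases hjk : j = k
        · subst hjk
          rw [hgapp j, if_neg (Nat.lt_irrefl j), if_pos (Nat.lt_succ_self j), targetA, if_pos hocc]
        · by_cases hjk2 : j < k
          · rw [hgapp j, if_pos hjk2, if_pos (by omega)]
          · rw [hgapp j, if_neg hjk2, if_neg (by omega)]
      · rw [hMk0, if_pos hocc, scan_eq_find Mk k 1 (cells.getD k 0 + 1), scanPred_congr Mk cells k hMlen (by omega) hoccM]
        cases hf : (PySem.List.pyRange 1 (cells.getD k 0 + 1) 1).find? (scanPred cells k) with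
        | none =>
          show Mk = _
          rw [hMk]
          apply List.map_congr_left
          intro j hj
          by_cases hjk : j = k
          · subst hjk
            rw [hgapp j, if_neg (Nat.lt_irrefl j), if_pos (Nat.lt_succ_self j), targetA,
              if_neg hocc, hf]
          · by_cases hjk2 : j < k
            · rw [hgapp j, if_pos hjk2, if_pos (by omega)]
            · rw [hgapp j, if_neg hjk2, if_neg (by omega)]
        | some c =>
          show Mk.set k (c - 1) = _
          rw [hMk, map_range_set _ _ _ _ hkN]
          apply List.map_congr_left
          intro j hj
          by_cases hjk : j = k
          · subst hjk
            rw [if_pos rfl, if_pos (Nat.lt_succ_self j), targetA, if_neg hocc, hf]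
          · rw [if_neg hjk]
            by_cases hjk2 : j < k
            · rw [hgapp j, if_pos hjk2, if_pos (by omega)]
            · rw [hgapp j, if_neg hjk2, if_neg (by omega)]
  rw [slow_down, key cells.length le_rfl]
  apply List.map_congr_left
  intro j hj
  rw [if_pos (List.mem_range.mp hj)]

-- B's backward pass: state after processing linear indices i .. 2n-1
lemma dist_fold (cells : List Int) :
    ∀ d i, i + d = 2 * cells.length →
      (List.range' i d).foldr
        (fun (x : Nat) (st : List Int × Int) =>
          (if x < cells.length then st.1.set x st.2 else st.1,
           if cells.getD (x % cells.length) 0 ≠ -1 then 1 else st.2 + 1))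
        (List.replicate cells.length 0, 2 * (cells.length : Int) + 1) =
      ((List.range cells.length).map (fun j => if i ≤ j then cfun cells (j + 1) else 0),
       cfun cells i) := by
  intro d
  induction d with
  | zero =>
    intro i hi
    rw [List.range'_zero, List.foldr_nil]
    refine congrArg₂ Prod.mk ?_ ?_
    · have hconst : ∀ j ∈ List.range cells.length,
          (fun j => if i ≤ j then cfun cells (j + 1) else (0 : Int)) j = (fun _ => (0 : Int)) j := by
        intro j hj
        have := List.mem_range.mp hj
        exact if_neg (by omega)
      rw [List.map_congr_left hconst, List.map_const', List.length_range]
    · rw [cfun, dif_neg (by omega)]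
  | succ d ih =>
    intro i hi
    rw [List.range'_succ, List.foldr_cons, ih (i + 1) (by omega)]
    have hi2 : i < 2 * cells.length := by omega
    refine congrArg₂ Prod.mk ?_ ?_
    · by_cases hiN : i < cells.length
      · rw [if_pos hiN, map_range_set _ _ _ _ hiN]
        apply List.map_congr_left
        intro j hj
        by_cases hji : j = i
        · subst hji; rw [if_pos rfl, if_pos (Nat.le_refl j)]
        · rw [if_neg hji]
          by_cases hij : i ≤ j
          · rw [if_pos (by omega), if_pos hij]
          · rw [if_neg (by omega), if_neg hij]
      · rw [if_neg hiN]
        apply List.map_congr_left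
        intro j hj
        have := List.mem_range.mp hj
        rw [if_neg (by omega), if_neg (by omega)]
    · show (if cells.getD (i % cells.length) 0 ≠ -1 then (1 : Int) else cfun cells (i + 1) + 1)
          = cfun cells i
      conv_rhs => rw [cfun]
      rw [dif_pos hi2]
      by_cases hocc : cells.getD (i % cells.length) 0 = -1
      · rw [if_neg (not_not_intro hocc),
          show occB cells i = false from by rw [occB, bne_eq_false_iff_eq]; exact hocc]
        rw [if_neg (by simp)]
      · rw [if_pos hocc,
          show occB cells i = true from by rw [occB, bne_iff_ne]; exact hocc]
        rw [if_pos rfl]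

lemma B_fold (cells : List Int) :
    slow_down_alt cells = (List.range cells.length).map (targetB cells) := by
  have hd := dist_fold cells (2 * cells.length) 0 (by omega)
  have hfold :
      ((List.range (2 * cells.length)).reverse).foldl
        (fun (st : List Int × Int) (i : Nat) =>
          (if i < cells.length then st.1.set i st.2 else st.1,
           if cells.getD (i % cells.length) 0 ≠ -1 then 1 else st.2 + 1))
        (List.replicate cells.length 0, 2 * (cells.length : Int) + 1)
      = ((List.range cells.length).map (fun j => cfun cells (j + 1)), cfun cells 0) := by
    rw [List.foldl_reverse, List.range_eq_range', hd]
    refine congrArg₂ Prod.mk ?_ rfl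
    apply List.map_congr_left
    intro j hj
    exact if_pos (Nat.zero_le j)
  simp only [slow_down_alt]
  rw [hfold]
  have key : ∀ k, k ≤ cells.length →
      (List.range k).foldl
        (fun cs j =>
          if cs.getD j 0 ≠ -1 then
            cs.set j (min (cs.getD j 0)
              (((List.range cells.length).map (fun j => cfun cells (j + 1))).getD j 0 - 1))
          else cs)
        cells =
      (List.range cells.length).map
        (fun j => if j < k then targetB cells j else cells.getD j 0) := by
    intro k
    induction k with
    | zero => intro _; simp only [List.range_zero, List.foldl_nil, Nat.not_lt_zero, if_false]; rw [cells_self]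
    | succ k ih =>
      intro hk
      have hkN : k < cells.length := by omega
      rw [List.range_succ, List.foldl_append, ih (by omega), List.foldl_cons, List.foldl_nil]
      set g := fun j => if j < k then targetB cells j else cells.getD j 0 with hg
      have hgapp : ∀ j, g j = if j < k then targetB cells j else cells.getD j 0 := fun _ => rfl
      have hMk0 : ((List.range cells.length).map g).getD k 0 = cells.getD k 0 := by
        rw [PySem.List.getD_map_range _ _ _ _ hkN, hgapp k, if_neg (Nat.lt_irrefl k)]
      have hDk : ((List.range cells.length).map (fun j => cfun cells (j + 1))).getD k 0
          = cfun cells (k + 1) := PySem.List.getD_map_range _ _ _ _ hkN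
      by_cases hocc : cells.getD k 0 = -1
      · rw [hMk0, if_neg (not_not_intro hocc)]
        apply List.map_congr_left
        intro j hj
        by_cases hjk : j = k
        · subst hjk
          rw [hgapp j, if_neg (Nat.lt_irrefl j), if_pos (Nat.lt_succ_self j), targetB, if_pos hocc]
        · by_cases hjk2 : j < k
          · rw [hgapp j, if_pos hjk2, if_pos (by omega)]
          · rw [hgapp j, if_neg hjk2, if_neg (by omega)]
      · rw [hMk0, if_pos hocc, hDk, map_range_set _ _ _ _ hkN]
        apply List.map_congr_left
        intro j hj
        by_cases hjk : j = k
        · subst hjk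
          rw [if_pos rfl, if_pos (Nat.lt_succ_self j), targetB, if_neg hocc]
        · rw [if_neg hjk]
          by_cases hjk2 : j < k
          · rw [hgapp j, if_pos hjk2, if_pos (by omega)]
          · rw [hgapp j, if_neg hjk2, if_neg (by omega)]
  rw [key cells.length le_rfl]
  apply List.map_congr_left
  intro j hj
  rw [if_pos (List.mem_range.mp hj)]

lemma find?_range'_iff (p : Nat → Bool) :
    ∀ (n a m : Nat), (List.range' a n).find? p = some m ↔
      (a ≤ m ∧ m < a + n ∧ p m = true ∧ ∀ k, a ≤ k → k < m → p k = false) := by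
  intro n
  induction n with
  | zero =>
    intro a m
    rw [List.range'_zero]
    simp only [List.find?_nil]
    constructor
    · intro h; exact absurd h (by simp)
    · rintro ⟨h1, h2, -, -⟩; omega
  | succ n ih =>
    intro a m
    rw [List.range'_succ, List.find?_cons]
    by_cases hpa : p a
    · simp only [hpa, ite_true, Option.some.injEq]
      constructor
      · rintro rfl
        exact ⟨le_rfl, by omega, hpa, fun k h1 h2 => by omega⟩
      · rintro ⟨h1, h2, h3, h4⟩
        by_contra hne
        have : p a = false := h4 a le_rfl (by omega)
        simp [hpa] at this
    · simp only [hpa, ite_false]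
      rw [ih (a + 1) m]
      constructor
      · rintro ⟨h1, h2, h3, h4⟩
        refine ⟨by omega, by omega, h3, fun k hk1 hk2 => ?_⟩
        rcases Nat.eq_or_lt_of_le hk1 with rfl | h
        · simpa using hpa
        · exact h4 k h hk2
      · rintro ⟨h1, h2, h3, h4⟩
        have ham : a ≠ m := by rintro rfl; simp [h3] at hpa
        exact ⟨by omega, by omega, h3, fun k hk1 hk2 => h4 k (by omega) hk2⟩

lemma cfun_find (cells : List Int) :
    ∀ d i, i + d = 2 * cells.length →
      cfun cells i =
        match (List.range' i d).find? (occB cells) with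
        | some m => (m : Int) - i + 1
        | none => 2 * (cells.length : Int) + 1 + d := by
  intro d
  induction d with
  | zero =>
    intro i hi
    rw [cfun, dif_neg (by omega)]
    simp
  | succ d ih =>
    intro i hi
    rw [List.range'_succ, List.find?_cons]
    by_cases hpi : occB cells i
    · rw [cfun, dif_pos (by omega), if_pos hpi, hpi]
      simp
    · rw [cfun, dif_pos (by omega), if_neg (by simp [hpi]),
        show occB cells i = false from by simpa using hpi]
      rw [ih (i + 1) (by omega)]
      cases hf : (List.range' (i + 1) d).find? (occB cells) with
      | none =>
        show (2 * (cells.length : Int) + 1 + (d : Int)) + 1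
            = 2 * (cells.length : Int) + 1 + ((d + 1 : Nat) : Int)
        push_cast; ring
      | some m =>
        have hm := (find?_range'_iff (occB cells) d (i + 1) m).mp hf
        have h1 : i + 1 ≤ m := hm.1
        show ((m : Int) - ((i + 1 : Nat) : Int) + 1) + 1 = (m : Int) - (i : Int) + 1
        push_cast; omega

lemma target_eq (cells : List Int) (j : Nat) (hj : j < cells.length) :
    targetA cells j = targetB cells j := by
  by_cases hocc : cells.getD j 0 = -1
  · rw [targetA, targetB, if_pos hocc, if_pos hocc]
  · rw [targetA, targetB, if_neg hocc, if_neg hocc]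
    set v := cells.getD j 0 with hv
    have hNpos : 0 < cells.length := by omega
    -- cell j itself is occupied one full ring ahead
    have hoccjN : occB cells (j + cells.length) = true := by
      rw [occB, Nat.add_mod_right, Nat.mod_eq_of_lt hj]
      exact bne_iff_ne.mpr hocc
    -- the nearest occupied linear cell strictly after j
    obtain ⟨m, hm⟩ : ∃ m,
        (List.range' (j + 1) (2 * cells.length - (j + 1))).find? (occB cells) = some m := by
      cases hF : (List.range' (j + 1) (2 * cells.length - (j + 1))).find? (occB cells) with
      | none =>
        exfalso
        have hmem : j + cells.length ∈ List.range' (j + 1) (2 * cells.length - (j + 1)) :=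
          List.mem_range'_1.mpr ⟨by omega, by omega⟩
        have := List.find?_eq_none.mp hF (j + cells.length) hmem
        rw [hoccjN] at this
        exact this rfl
      | some m => exact ⟨m, rfl⟩
    obtain ⟨hm1, hm2, hm3, hm4⟩ := (find?_range'_iff (occB cells) _ _ _).mp hm
    have hmle : m ≤ j + cells.length := by
      by_contra hgt
      have := hm4 (j + cells.length) (by omega) (by omega)
      rw [hoccjN] at this
      exact absurd this (by simp)
    have hcf : cfun cells (j + 1) = (m : Int) - j := by
      have h : cfun cells (j + 1) = (m : Int) - ((j + 1 : Nat) : Int) + 1 := by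
        have h0 := cfun_find cells (2 * cells.length - (j + 1)) (j + 1) (by omega)
        rw [hm] at h0
        exact h0
      rw [h]
      push_cast
      omega
    -- rewrite A's scan range as a find? over Nat offsets
    have hpy : PySem.List.pyRange 1 (v + 1) 1 = (List.range v.toNat).map (fun k : Nat => (1 : Int) + k) := by
      rw [PySem.List.pyRange_one, show (v + 1 - 1).toNat = v.toNat from by omega]
    have hcomp : (scanPred cells j ∘ fun k : Nat => (1 : Int) + k) = fun k : Nat => occB cells (j + 1 + k) := by
      funext k
      simp only [Function.comp_apply]
      rw [scanPred, occB,
        show ((j : Int) + (1 + (k : Nat))) = (((j + 1 + k : Nat) : Int)) from by push_cast; ring,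
        show ((cells.length : Int)) = (((cells.length : Nat) : Int)) from rfl,
        PySem.Int.mod_natCast, Int.toNat_natCast]
    rw [hpy, List.find?_map, hcomp]
    by_cases hle : (m : Int) - j ≤ v
    · have hfind : (List.range v.toNat).find? (fun k : Nat => occB cells (j + 1 + k))
          = some (m - (j + 1)) := by
        rw [List.range_eq_range']
        apply (find?_range'_iff _ _ _ _).mpr
        refine ⟨Nat.zero_le _, by omega, ?_, ?_⟩
        · rw [show j + 1 + (m - (j + 1)) = m from by omega]
          exact hm3
        · intro k _ hk
          exact hm4 (j + 1 + k) (by omega) (by omega)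
      rw [hfind, Option.map_some]
      show (1 : Int) + (m - (j + 1) : Nat) - 1 = min v (cfun cells (j + 1) - 1)
      rw [hcf]
      omega
    · have hfind : (List.range v.toNat).find? (fun k : Nat => occB cells (j + 1 + k)) = none := by
        apply List.find?_eq_none.mpr
        intro k hk
        have hkv := List.mem_range.mp hk
        have hlt : j + 1 + k < m := by omega
        have := hm4 (j + 1 + k) (by omega) hlt
        rw [this]
        exact Bool.false_ne_true
      rw [hfind, Option.map_none]
      show v = min v (cfun cells (j + 1) - 1)
      rw [hcf]
      omega

-- ===== VERDICT (by name: the statement is the Claim_ definition above) =====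
theorem slow_down_spec : Claim_equal_slow_down := by
  intro cells _
  unfold Spec_slow_down
  rw [A_fold, B_fold]
  apply List.map_congr_left
  intro j hj
  exact target_eq cells j (List.mem_range.mp hj)
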